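-- pv_equiv track=rewrite | github.com/afnanenayet/daily-coding-problem | src/573.py | reverse_interweave
-- ===== SOURCE A (Python) =====
-- from typing import List, NamedTuple, Deque
-- from collections import deque
--
-- def reverse_interweave(stack: List[int]) -> List[int]:
--     q: Deque[int] = deque()
--
--     # first, we reverse the list
--     while stack:
--         q.append(stack.pop())
--
--     # We want to keep the first half of the queue in the queue, and the second half of the queue
--     # back to the stack (which was originally the first half, but now reversed)
--     old_len = len(q)
--
--     for i in range(old_len):
--         if i < old_len // 2:
--             q.append(q.popleft())
--         else:
--             stack.append(q.popleft())
--
--     # Start pushing items back into the queue, weaving elements together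
--     for i in range(old_len // 2):
--         q.append(stack.pop())
--         q.append(q.popleft())
--
--     # If there's an odd number of elements, the stack will have an extra element that we need to add
--     # to the end of the queue. There is nothing to weave with here so we just add the last element
--     # to the end of the queue.
--     if stack:
--         q.append(stack.pop())
--
--     # Push everything from the queue back onto the stack since the problem says we have to use the
--     # stack
--     while q:
--         stack.append(q.popleft())
--     return stack
-- ===== SOURCE B (Python) =====
-- from typing import List
-- from collections import deque
--
--
-- def reverse_interweave(stack: List[int]) -> List[int]:
--     # Two-ended interleave: first, last, second, second-to-last, ...
--     vals = deque(stack)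
--     res: List[int] = []
--     while len(vals) > 1:
--         res.append(vals.popleft())
--         res.append(vals.pop())
--     res += vals  # leftover middle element for odd lengths
--     stack[:] = res
--     return stack
-- ===== Notes on version B (the rewrite author's own statement) =====
-- stated objective: simpler
-- what changed: Replaces A's four queue-shuffling passes (reverse into a deque, rotate-and-split, weave, drain back) by a single loop that emits one element from the front and one from the back of the values until they meet.
import Mathlib
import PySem

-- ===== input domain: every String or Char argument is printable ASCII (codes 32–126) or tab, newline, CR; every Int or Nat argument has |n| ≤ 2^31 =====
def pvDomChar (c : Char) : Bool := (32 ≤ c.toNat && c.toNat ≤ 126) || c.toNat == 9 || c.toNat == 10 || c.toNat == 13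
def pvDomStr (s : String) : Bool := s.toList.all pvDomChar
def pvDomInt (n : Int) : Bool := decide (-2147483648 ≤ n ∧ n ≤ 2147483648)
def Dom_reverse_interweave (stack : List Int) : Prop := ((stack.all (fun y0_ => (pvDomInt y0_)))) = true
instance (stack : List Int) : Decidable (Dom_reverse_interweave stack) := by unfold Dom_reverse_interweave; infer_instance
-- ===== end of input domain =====

-- B replaces A's four queue-shuffling passes by one front/back two-ended loop (objective: simpler).
-- A mutates its argument in place; the equivalence proved here is about the RETURN value only
-- (B performs the same final mutation via stack[:] = res).

-- ===== PORT A =====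
-- while stack: q.append(stack.pop())
def pvPopAllToQ (s q : List Int) : List Int :=
  match h : s.getLast? with
  | none => q
  | some x => pvPopAllToQ s.dropLast (q ++ [x])
termination_by s.length
decreasing_by
  cases s with
  | nil => simp at h
  | cons a t => simp [List.length_dropLast]

-- for i in range(old_len): if i < old_len // 2: q.append(q.popleft()) else: stack.append(q.popleft())
def pvSplitLoop (i n half : Nat) (q s : List Int) : List Int × List Int :=
  if i < n then
    match q with
    | [] => pvSplitLoop (i+1) n half q s          -- q.popleft() on an empty deque never happens in A's run
    | h :: t =>
      if i < half then pvSplitLoop (i+1) n half (t ++ [h]) s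
      else pvSplitLoop (i+1) n half t (s ++ [h])
  else (q, s)
termination_by n - i

-- for i in range(old_len // 2): q.append(stack.pop()); q.append(q.popleft())
def pvWeaveLoop (j k : Nat) (q s : List Int) : List Int × List Int :=
  if j < k then
    match s.getLast? with
    | none => pvWeaveLoop (j+1) k q s             -- stack.pop() on empty never happens in A's run
    | some x =>
      match q ++ [x] with
      | [] => pvWeaveLoop (j+1) k (q ++ [x]) s.dropLast   -- unreachable: q ++ [x] ≠ []
      | h1 :: t1 => pvWeaveLoop (j+1) k (t1 ++ [h1]) s.dropLast
  else (q, s)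
termination_by k - j

-- while q: stack.append(q.popleft())
def pvDrainQ (q s : List Int) : List Int :=
  match q with
  | [] => s
  | h :: t => pvDrainQ t (s ++ [h])

def reverse_interweave (stack : List Int) : List Int :=
  let q := pvPopAllToQ stack []
  let old_len := q.length
  let p1 := pvSplitLoop 0 old_len (old_len / 2) q []
  let p2 := pvWeaveLoop 0 (old_len / 2) p1.1 p1.2
  -- if stack: q.append(stack.pop())
  let p3 : List Int × List Int :=
    match p2.2.getLast? with
    | some x => (p2.1 ++ [x], p2.2.dropLast)
    | none => (p2.1, p2.2)
  pvDrainQ p3.1 p3.2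

-- ===== PORT B =====
-- while len(vals) > 1: res.append(vals.popleft()); res.append(vals.pop());  then res += vals
def pvAltGo (vals : List Int) : List Int :=
  match vals with
  | [] => []
  | [x] => [x]
  | x :: y :: rest =>
      x :: (y :: rest).getLast (by simp) :: pvAltGo ((y :: rest).dropLast)
termination_by vals.length

def reverse_interweave_alt (stack : List Int) : List Int := pvAltGo stack

-- ===== PRECONDITION & SPEC =====
def Spec_reverse_interweave (stack : List Int) (out : List Int) : Prop := out = reverse_interweave_alt stack
instance (stack : List Int) (out : List Int) : Decidable (Spec_reverse_interweave stack out) := by unfold Spec_reverse_interweave; infer_instance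

-- ===== CLAIM (what is proved, stated in full; the proofs are below) =====
def Claim_equal_reverse_interweave : Prop := ∀ (stack : List Int), Dom_reverse_interweave stack → Spec_reverse_interweave stack (reverse_interweave stack)

-- ===== LEMMAS AND PROOFS =====

-- strict two-ended interleave (used only to state the common closed form)
def pvInterleave : List Int → List Int → List Int
  | x :: xs, y :: ys => x :: y :: pvInterleave xs ys
  | _, _ => []

-- common closed form: first-half heads woven with reversed second half, plus the odd middle
def pvF (a : List Int) : List Int :=
  pvInterleave (a.take (a.length / 2)) ((a.drop (a.length - a.length / 2)).reverse) ++
    (a.take (a.length - a.length / 2)).reverse.take ((a.length - a.length / 2) - a.length / 2)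

theorem pvPopAllToQ_eq (s : List Int) : ∀ q, pvPopAllToQ s q = q ++ s.reverse := by
  induction s using List.reverseRecOn with
  | nil => intro q; rw [pvPopAllToQ]; simp
  | append_singleton as a ih =>
      intro q
      rw [pvPopAllToQ]
      split
      · simp_all
      · rename_i x h
        rw [List.getLast?_concat] at h
        cases h
        simp [ih]

theorem pvDrainQ_eq (q : List Int) : ∀ s, pvDrainQ q s = s ++ q := by
  induction q with
  | nil => intro s; simp [pvDrainQ]
  | cons h t ih => intro s; simp [pvDrainQ, ih]

theorem pvSplitLoop_phase2 (n half : Nat) :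
    ∀ m i q s, n - i = m → half ≤ i →
      pvSplitLoop i n half q s = (q.drop m, s ++ q.take m) := by
  intro m
  induction m with
  | zero =>
      intro i q s hm hi
      rw [pvSplitLoop.eq_def]
      simp [show ¬ i < n by omega]
  | succ m ih =>
      intro i q s hm hi
      rw [pvSplitLoop.eq_def]
      rw [if_pos (by omega : i < n)]
      cases q with
      | nil => rw [ih (i+1) [] s (by omega) (by omega)]; simp
      | cons h t =>
          simp only []
          rw [if_neg (by omega : ¬ i < half)]
          rw [ih (i+1) t (s ++ [h]) (by omega) (by omega)]
          simp

theorem pvSplitLoop_phase1 (n half : Nat) (hhn : half ≤ n) :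
    ∀ m i q s, half - i = m → i ≤ half → m ≤ q.length →
      pvSplitLoop i n half q s =
        ((q.drop m ++ q.take m).drop (n - half), s ++ (q.drop m ++ q.take m).take (n - half)) := by
  intro m
  induction m with
  | zero =>
      intro i q s hm hi _
      have hih : i = half := by omega
      rw [hih, pvSplitLoop_phase2 n half (n - half) half q s rfl le_rfl]
      simp
  | succ m ih =>
      intro i q s hm hi hlen
      cases q with
      | nil => simp at hlen
      | cons h t =>
          rw [pvSplitLoop.eq_def]
          rw [if_pos (by omega : i < n)]
          simp only []
          rw [if_pos (by omega : i < half)]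
          have hmt : m ≤ t.length := by simp at hlen; omega
          rw [ih (i+1) (t ++ [h]) s (by omega) (by omega) (by simp; omega)]
          have hd : (t ++ [h]).drop m = t.drop m ++ [h] :=
            List.drop_append_of_le_length hmt
          have ht : (t ++ [h]).take m = t.take m :=
            List.take_append_of_le_length hmt
          rw [hd, ht]
          have : t.drop m ++ [h] ++ t.take m = (h :: t).drop (m+1) ++ (h :: t).take (m+1) := by
            simp
          rw [this]

theorem pvWeaveLoop_eq (k : Nat) :
    ∀ m j q s, k - j = m → m ≤ q.length → m ≤ s.length →
      pvWeaveLoop j k q s =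
        (q.drop m ++ pvInterleave (s.reverse.take m) (q.take m), s.take (s.length - m)) := by
  intro m
  induction m with
  | zero =>
      intro j q s hm _ _
      rw [pvWeaveLoop]
      simp [show ¬ j < k by omega, pvInterleave]
  | succ m ih =>
      intro j q s hm hq hs
      cases q with
      | nil => simp at hq
      | cons hq1 tq =>
          have hs0 : s ≠ [] := by intro h; subst h; simp at hs
          obtain ⟨s', x, hsx⟩ : ∃ s' x, s = s' ++ [x] := by
            rcases List.eq_nil_or_concat s with h | ⟨s', x, h⟩
            · exact absurd h hs0
            · exact ⟨s', x, by simpa using h⟩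
          subst hsx
          have hmt : m ≤ tq.length := by simp at hq; omega
          have hms : m ≤ s'.length := by simp at hs; omega
          rw [pvWeaveLoop]
          rw [if_pos (by omega : j < k)]
          simp only [List.getLast?_concat, List.cons_append]
          rw [ih (j+1) ((tq ++ [x]) ++ [hq1]) ((s' ++ [x]).dropLast) (by omega)
              (by simp; try omega) (by simp; try omega)]
          have h1 : ((tq ++ [x]) ++ [hq1]).drop m = tq.drop m ++ [x, hq1] := by
            rw [List.append_assoc, List.drop_append_of_le_length hmt]; rfl
          have h2 : ((tq ++ [x]) ++ [hq1]).take m = tq.take m := by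
            rw [List.append_assoc]; exact List.take_append_of_le_length hmt
          have h3 : (s' ++ [x]).dropLast = s' := by simp
          have h4 : (s' ++ [x]).reverse.take (m+1) = x :: s'.reverse.take m := by
            simp [List.reverse_append]
          have h5 : (s' ++ [x]).length - (m+1) = s'.length - m := by simp
          have h6 : (s' ++ [x]).take (s'.length - m) = s'.take (s'.length - m) :=
            List.take_append_of_le_length (by omega)
          rw [h1, h2, h3, h4, h5, h6]
          rw [show (hq1 :: tq).take (m+1) = hq1 :: tq.take m from rfl,
              show (hq1 :: tq).drop (m+1) = tq.drop m from rfl, pvInterleave]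
          simp

theorem pvFinal_step (q2 s2 : List Int) (h : s2.length ≤ 1) :
    pvDrainQ (match s2.getLast? with
      | some x => (q2 ++ [x], s2.dropLast)
      | none => (q2, s2)).1
      (match s2.getLast? with
      | some x => (q2 ++ [x], s2.dropLast)
      | none => (q2, s2)).2 = q2 ++ s2 := by
  match s2 with
  | [] => simp [pvDrainQ_eq]
  | [y] => simp [pvDrainQ_eq]
  | y1 :: y2 :: t => simp at h

theorem reverse_interweave_eq_pvF (a : List Int) : reverse_interweave a = pvF a := by
  unfold reverse_interweave
  simp only [pvPopAllToQ_eq, List.nil_append, List.length_reverse]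
  rw [pvSplitLoop_phase1 a.length (a.length / 2) (by omega) (a.length / 2) 0 a.reverse []
      (by omega) (by omega) (by simp; omega)]
  have hlen1 : (a.reverse.drop (a.length / 2)).length = a.length - a.length / 2 := by simp
  have e1 : List.drop (a.length - a.length / 2)
      (a.reverse.drop (a.length / 2) ++ a.reverse.take (a.length / 2)) =
      a.reverse.take (a.length / 2) := by rw [← hlen1, List.drop_left]
  have e2 : List.take (a.length - a.length / 2)
      (a.reverse.drop (a.length / 2) ++ a.reverse.take (a.length / 2)) =
      a.reverse.drop (a.length / 2) := by rw [← hlen1, List.take_left]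
  dsimp only
  simp only [List.nil_append, e1, e2]
  rw [pvWeaveLoop_eq (a.length / 2) (a.length / 2) 0 (a.reverse.take (a.length / 2))
      (a.reverse.drop (a.length / 2)) (by omega) (by simp; omega) (by simp; omega)]
  have hlen2 : (List.drop (a.length / 2) a.reverse).length - a.length / 2 =
      (a.length - a.length / 2) - a.length / 2 := by simp

  have f1 : List.drop (a.length / 2) (List.take (a.length / 2) a.reverse) = [] := by
    simp
  have f4 : List.take (a.length / 2) (List.take (a.length - a.length / 2) a) =
      List.take (a.length / 2) a := by rw [List.take_take]; congr 1; omega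
  simp only [hlen2]
  rw [f1]
  simp only [List.take_take, Nat.min_self, List.nil_append]
  have r6 : (List.drop (a.length / 2) a.reverse).reverse =
      List.take (a.length - a.length / 2) a := by
    rw [List.drop_reverse, List.reverse_reverse]
  rw [r6, f4]
  rw [show List.take (a.length / 2) a.reverse =
      (List.drop (a.length - a.length / 2) a).reverse from List.take_reverse]
  rw [List.drop_reverse]
  rw [pvFinal_step _ _ (by simp; omega)]
  unfold pvF
  rfl

theorem pvF_step (x w : Int) (zs : List Int) :
    pvF (x :: (zs ++ [w])) = x :: w :: pvF zs := by
  unfold pvF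
  simp only [List.length_cons, List.length_append, List.length_nil]
  rw [show (zs.length + 1 + 1) / 2 = zs.length / 2 + 1 by omega]
  rw [show zs.length + 1 + 1 - (zs.length / 2 + 1) = (zs.length - zs.length / 2) + 1 by omega]
  rw [List.take_succ_cons, List.drop_succ_cons, List.take_succ_cons]
  rw [List.take_append_of_le_length (by omega : zs.length / 2 ≤ zs.length)]
  rw [List.drop_append_of_le_length (by omega : zs.length - zs.length / 2 ≤ zs.length)]
  rw [List.take_append_of_le_length (by omega : zs.length - zs.length / 2 ≤ zs.length)]
  rw [show zs.length - zs.length / 2 + 1 - (zs.length / 2 + 1) =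
      (zs.length - zs.length / 2) - zs.length / 2 by omega]
  simp only [List.reverse_append, List.reverse_cons, List.reverse_nil, List.nil_append,
    List.singleton_append]
  rw [pvInterleave]
  rw [List.take_append_of_le_length (by simp)]
  simp

theorem pvAltGo_eq_pvF (a : List Int) : pvAltGo a = pvF a := by
  induction a using pvAltGo.induct with
  | case1 => rw [pvAltGo]; simp [pvF, pvInterleave]
  | case2 x => rw [pvAltGo]; simp [pvF, pvInterleave]
  | case3 x y rest ih =>
      rw [pvAltGo, ih]
      conv_rhs => rw [show (x :: y :: rest : List Int) =
        x :: ((y :: rest).dropLast ++ [(y :: rest).getLast (by simp)]) from by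
          rw [List.dropLast_append_getLast]]
      rw [pvF_step]

-- ===== VERDICT (by name: the statement is the Claim_ definition above) =====
theorem reverse_interweave_spec : Claim_equal_reverse_interweave := by
  intro a _
  unfold Spec_reverse_interweave reverse_interweave_alt
  rw [reverse_interweave_eq_pvF, pvAltGo_eq_pvF]
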